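-- pv_equiv track=rewrite | github.com/SignalPilot-Labs/buddy | sandbox/session/security_git.py | _extract_dollar_paren_bodies
-- ===== SOURCE A (Python) =====
-- def _extract_dollar_paren_bodies(text: str) -> list[str]:
--     """Extract all $(...) bodies from text using a balanced-paren walker."""
--     bodies: list[str] = []
--     i = 0
--     n = len(text)
--     while i < n - 1:
--         if text[i] == "$" and text[i + 1] == "(":
--             depth = 1
--             start = i + 2
--             j = start
--             while j < n and depth > 0:
--                 if text[j] == "(":
--                     depth += 1
--                 elif text[j] == ")":
--                     depth -= 1
--                 j += 1
--             if depth == 0: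
--                 bodies.append(text[start:j - 1])
--                 i = j
--                 continue
--         i += 1
--     return bodies
-- ===== SOURCE B (Python) =====
-- def _extract_dollar_paren_bodies(text: str) -> list[str]:
--     """Extract all $(...) bodies: one stack pass precomputes paren matches, then a linear scan."""
--     n = len(text)
--     match: dict[int, int] = {}
--     stack: list[int] = []
--     for j, c in enumerate(text):
--         if c == "(":
--             stack.append(j)
--         elif c == ")":
--             if stack:
--                 match[stack.pop()] = j
--     bodies: list[str] = []
--     i = 0
--     while i < n - 1:
--         if text[i] == "$" and text[i + 1] == "(" and (i + 1) in match:
--             j = match[i + 1]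
--             bodies.append(text[i + 2:j])
--             i = j + 1
--         else:
--             i += 1
--     return bodies
-- ===== Notes on version B (the rewrite author's own statement) =====
-- stated objective: alternative
-- what changed: Replaces A's balanced-paren walker that rescans forward from every '$(' with a single stack pass that precomputes the matching ')' for every '(' into a dict, followed by one linear scan doing O(1) lookups.
import Mathlib
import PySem

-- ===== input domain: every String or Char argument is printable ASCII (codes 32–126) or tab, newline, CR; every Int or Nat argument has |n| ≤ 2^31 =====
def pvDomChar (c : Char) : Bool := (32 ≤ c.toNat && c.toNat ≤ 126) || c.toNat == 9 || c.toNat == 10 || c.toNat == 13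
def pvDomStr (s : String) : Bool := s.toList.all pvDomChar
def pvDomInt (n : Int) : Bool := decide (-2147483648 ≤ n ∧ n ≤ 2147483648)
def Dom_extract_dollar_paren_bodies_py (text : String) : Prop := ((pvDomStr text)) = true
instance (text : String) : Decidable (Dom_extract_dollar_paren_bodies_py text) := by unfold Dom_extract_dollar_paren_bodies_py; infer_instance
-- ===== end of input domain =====

-- B replaces A's rescanning balanced-paren walker by a different algorithm: one stack pass
-- precomputing every paren match into a dict, then a single scan with O(1) lookups.

-- ===== PORT A =====
-- inner 'while j < n and depth > 0' loop of A
def pvInner (cs : List Char) (j depth : Nat) : Nat × Nat :=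
  if h : j < cs.length ∧ 0 < depth then
    if cs[j]'h.1 = '(' then pvInner cs (j + 1) (depth + 1)
    else if cs[j]'h.1 = ')' then pvInner cs (j + 1) (depth - 1)
    else pvInner cs (j + 1) depth
  else (j, depth)
termination_by cs.length - j
decreasing_by all_goals exact Nat.sub_succ_lt_self _ _ h.1

-- needed by pvOuterA's termination
theorem pvInner_ge_aux (cs : List Char) :
    ∀ k j depth, cs.length - j ≤ k → j ≤ (pvInner cs j depth).1 := by
  intro k
  induction k with
  | zero =>
    intro j d h
    rw [pvInner]
    split
    · rename_i hh; exact absurd hh (by omega)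
    · exact Nat.le_refl _
  | succ k ih =>
    intro j d h
    rw [pvInner]
    split
    · rename_i hh
      have step : ∀ d', j + 1 ≤ (pvInner cs (j + 1) d').1 :=
        fun d' => ih (j + 1) d' (by omega)
      split
      · exact Nat.le_of_succ_le (step _)
      · split
        · exact Nat.le_of_succ_le (step _)
        · exact Nat.le_of_succ_le (step _)
    · exact Nat.le_refl _

theorem pvInner_ge (cs : List Char) (j depth : Nat) : j ≤ (pvInner cs j depth).1 :=
  pvInner_ge_aux cs (cs.length - j) j depth (Nat.le_refl _)

-- outer 'while i < n - 1' loop of A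
def pvOuterA (cs : List Char) (i : Nat) (acc : List String) : List String :=
  if h : i + 1 < cs.length then
    if cs[i]'(Nat.lt_of_succ_lt h) = '$' ∧ cs[i + 1]'h = '(' then
      if (pvInner cs (i + 2) 1).2 = 0 then
        pvOuterA cs (pvInner cs (i + 2) 1).1
          (acc ++ [String.ofList (PySem.List.slice cs (some ((i : Int) + 2))
            (some (((pvInner cs (i + 2) 1).1 : Int) - 1)))])
      else pvOuterA cs (i + 1) acc
    else pvOuterA cs (i + 1) acc
  else acc
termination_by cs.length - i
decreasing_by
  · exact Nat.sub_lt_sub_left (Nat.lt_of_succ_lt h)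
      (Nat.lt_of_lt_of_le (Nat.lt_succ_of_lt (Nat.lt_succ_self i)) (pvInner_ge cs (i + 2) 1))
  · exact Nat.sub_succ_lt_self _ _ (Nat.lt_of_succ_lt h)
  · exact Nat.sub_succ_lt_self _ _ (Nat.lt_of_succ_lt h)

def extract_dollar_paren_bodies_py (text : String) : List String :=
  pvOuterA text.toList 0 []

-- ===== PORT B =====
-- B's first pass: 'for j, c in enumerate(text)' maintaining (stack, match)
def pvBuild (rest : List Char) (j : Nat) (stack : List Nat) (m : PySem.Dict Nat Nat) :
    List Nat × PySem.Dict Nat Nat :=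
  match rest with
  | [] => (stack, m)
  | c :: rest' =>
    if c = '(' then pvBuild rest' (j + 1) (j :: stack) m
    else if c = ')' then
      match stack with
      | [] => pvBuild rest' (j + 1) [] m
      | p :: st => pvBuild rest' (j + 1) st (m.insert p j)
    else pvBuild rest' (j + 1) stack m

-- needed by pvScanB's termination: every match entry has key < value
theorem pvBuild_lt (rest : List Char) (j : Nat) (stack : List Nat) (m : PySem.Dict Nat Nat)
    (hm : ∀ pq ∈ m.items, pq.1 < pq.2) (hst : ∀ p ∈ stack, p < j) :
    ∀ pq ∈ (pvBuild rest j stack m).2.items, pq.1 < pq.2 := by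
  induction rest generalizing j stack m with
  | nil => simpa [pvBuild] using hm
  | cons c rest' ih =>
    simp only [pvBuild]
    split
    · refine ih _ _ _ hm ?_
      intro p hp
      rcases hp with _ | ⟨_, h⟩
      · omega
      · exact Nat.lt_succ_of_lt (hst _ h)
    · split
      · split
        · exact ih _ _ _ hm (by simp)
        · rename_i p st _
          refine ih _ _ _ ?_ (fun q hq => Nat.lt_succ_of_lt (hst _ (by simp [hq])))
          intro pq hpq
          rcases (PySem.Dict.mem_items_insert _ _ _ _).1 hpq with h | h
          · subst h; exact hst _ (by simp)
          · exact hm _ h.1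
      · exact ih _ _ _ hm (fun q hq => Nat.lt_succ_of_lt (hst _ hq))

-- B's second pass: linear scan with O(1) match lookups
def pvScanB (cs : List Char) (m : PySem.Dict Nat Nat) (hm : ∀ pq ∈ m.items, pq.1 < pq.2)
    (i : Nat) (acc : List String) : List String :=
  if h : i + 1 < cs.length then
    if cs[i]'(Nat.lt_of_succ_lt h) = '$' ∧ cs[i + 1]'h = '(' then
      match hj : m.get? (i + 1) with
      | some j => pvScanB cs m hm (j + 1)
          (acc ++ [String.ofList (PySem.List.slice cs (some ((i : Int) + 2)) (some (j : Int)))])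
      | none => pvScanB cs m hm (i + 1) acc
    else pvScanB cs m hm (i + 1) acc
  else acc
termination_by cs.length - i
decreasing_by
  · exact Nat.sub_lt_sub_left (Nat.lt_of_succ_lt h)
      (Nat.lt_succ_of_lt (Nat.lt_of_succ_lt (hm _ (PySem.Dict.mem_items_of_get?_eq_some m hj))))
  · exact Nat.sub_succ_lt_self _ _ (Nat.lt_of_succ_lt h)
  · exact Nat.sub_succ_lt_self _ _ (Nat.lt_of_succ_lt h)

def extract_dollar_paren_bodies_py_alt (text : String) : List String :=
  pvScanB text.toList (pvBuild text.toList 0 [] PySem.Dict.empty).2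
    (pvBuild_lt text.toList 0 [] PySem.Dict.empty (fun _ h => nomatch h) (fun _ h => nomatch h)) 0 []

-- ===== PRECONDITION & SPEC =====
def Spec_extract_dollar_paren_bodies_py (text : String) (out : List String) : Prop := out = extract_dollar_paren_bodies_py_alt text
instance (text : String) (out : List String) : Decidable (Spec_extract_dollar_paren_bodies_py text out) := by unfold Spec_extract_dollar_paren_bodies_py; infer_instance

-- ===== CLAIM (what is proved, stated in full; the proofs are below) =====
def Claim_equal_extract_dollar_paren_bodies_py : Prop := ∀ (text : String), Dom_extract_dollar_paren_bodies_py text → Spec_extract_dollar_paren_bodies_py text (extract_dollar_paren_bodies_py text)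

-- ===== LEMMAS AND PROOFS =====

theorem pvInner_step (cs : List Char) (j d : Nat) (hj : j < cs.length) (hd : 0 < d) :
    pvInner cs j d =
      pvInner cs (j + 1) (if cs[j] = '(' then d + 1 else if cs[j] = ')' then d - 1 else d) := by
  rw [pvInner]; simp [hj, hd]
  split <;> [skip; split] <;> simp_all

theorem pvInner_stop (cs : List Char) (j d : Nat) (h : ¬(j < cs.length ∧ 0 < d)) :
    pvInner cs j d = (j, d) := by
  rw [pvInner]; simp [h]

theorem pvBuild_inv (cs : List Char) :
    ∀ (rest : List Char) (j : Nat) (st : List Nat) (m : PySem.Dict Nat Nat),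
      j ≤ cs.length → rest = cs.drop j →
      (∀ t (ht : t < st.length), st[t] < j ∧ pvInner cs (st[t] + 1) 1 = pvInner cs j (t + 1)) →
      (∀ pq ∈ m.items, pq.1 < pq.2 ∧ pq.2 < j ∧ pvInner cs (pq.1 + 1) 1 = (pq.2 + 1, 0)) →
      (∀ p, p < j → (hp : p < cs.length) → cs[p] = '(' → p ∈ st ∨ p ∈ m.keys) →
      m.keys.Nodup →
      ((∀ t (ht : t < (pvBuild rest j st m).1.length),
          pvInner cs ((pvBuild rest j st m).1[t] + 1) 1 = pvInner cs cs.length (t + 1)) ∧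
       (∀ pq ∈ (pvBuild rest j st m).2.items, pvInner cs (pq.1 + 1) 1 = (pq.2 + 1, 0)) ∧
       (∀ p, (hp : p < cs.length) → cs[p] = '(' →
          p ∈ (pvBuild rest j st m).1 ∨ p ∈ (pvBuild rest j st m).2.keys) ∧
       (pvBuild rest j st m).2.keys.Nodup) := by
  intro rest
  induction rest with
  | nil =>
    intro j st m hj hdrop hst hm hcomp hnd
    have hjn : j = cs.length := by
      have := congrArg List.length hdrop
      simp at this; omega
    subst hjn
    refine ⟨fun t ht => (hst t ht).2, fun pq hpq => (hm pq hpq).2.2, ?_, hnd⟩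
    intro p hp hpc
    exact hcomp p hp hp hpc
  | cons c rest' ih =>
    intro j st m hj hdrop hst hm hcomp hnd
    have hjn : j < cs.length := by
      by_contra hcon
      rw [List.drop_eq_nil_of_le (by omega)] at hdrop
      simp at hdrop
    have hkey : cs[j] :: cs.drop (j + 1) = c :: rest' := by
      rw [List.getElem_cons_drop]; exact hdrop.symm
    have hc0 : cs[j] = c := by injection hkey
    have hdrop' : rest' = cs.drop (j + 1) := by injection hkey with _ h; exact h.symm
    simp only [pvBuild]
    split
    · -- c = '('
      rename_i hcc
      refine ih (j + 1) (j :: st) m (by omega) hdrop' ?_ ?_ ?_ hnd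
      · intro t ht
        match t with
        | 0 =>
          simp only [List.getElem_cons_zero]
          exact ⟨by omega, by norm_num⟩
        | Nat.succ t =>
          simp only [List.getElem_cons_succ]
          have h1 := hst t (by simpa using ht)
          refine ⟨by omega, ?_⟩
          rw [h1.2, pvInner_step cs j (t + 1) hjn (by omega)]
          simp [hc0, hcc]
      · intro pq hpq
        have := hm pq hpq
        exact ⟨this.1, by omega, this.2.2⟩
      · intro p hpj hp hpc
        rcases Nat.lt_succ_iff_lt_or_eq.1 hpj with h | h
        · rcases hcomp p h hp hpc with h' | h'
          · exact Or.inl (List.mem_cons_of_mem _ h')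
          · exact Or.inr h'
        · subst h; exact Or.inl (List.mem_cons_self ..)
    · split
      · -- c = ')'
        rename_i hne hcc
        split
        · -- empty stack
          refine ih (j + 1) [] m (by omega) hdrop' (by simp) ?_ ?_ hnd
          · intro pq hpq
            have := hm pq hpq
            exact ⟨this.1, by omega, this.2.2⟩
          · intro p hpj hp hpc
            rcases Nat.lt_succ_iff_lt_or_eq.1 hpj with h | h
            · rcases hcomp p h hp hpc with h' | h'
              · simp_all
              · exact Or.inr h'
            · subst h; rw [hpc] at hc0; rw [← hc0] at hcc; simp at hcc
        · -- stack p :: st'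
          rename_i p st'
          have h0 := hst 0 (by simp)
          simp only [List.getElem_cons_zero] at h0
          have hclose : pvInner cs j 1 = (j + 1, 0) := by
            rw [pvInner_step cs j 1 hjn (by omega)]
            simp [hc0, hcc]
            exact pvInner_stop cs (j + 1) 0 (by omega)
          have hpEq : pvInner cs (p + 1) 1 = (j + 1, 0) := by rw [h0.2, hclose]
          refine ih (j + 1) st' (m.insert p j) (by omega) hdrop' ?_ ?_ ?_
            (PySem.Dict.nodup_keys_insert _ _ _ hnd)
          · intro t ht
            have h1 := hst (t + 1) (by simp; omega)
            simp only [List.getElem_cons_succ] at h1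
            refine ⟨by omega, ?_⟩
            rw [h1.2, pvInner_step cs j (t + 2) hjn (by omega)]
            simp [hc0, hcc]
          · intro pq hpq
            rcases (PySem.Dict.mem_items_insert _ _ _ _).1 hpq with h | h
            · subst h; exact ⟨h0.1, by omega, hpEq⟩
            · have := hm pq h.1
              exact ⟨this.1, by omega, this.2.2⟩
          · intro p' hpj hp hpc
            rcases Nat.lt_succ_iff_lt_or_eq.1 hpj with h | h
            · rcases hcomp p' h hp hpc with h' | h'
              · rcases h' with _ | ⟨_, h'⟩
                · exact Or.inr ((PySem.Dict.mem_keys_insert _ _ _ _).2 (Or.inl rfl))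
                · exact Or.inl h'
              · exact Or.inr ((PySem.Dict.mem_keys_insert _ _ _ _).2 (Or.inr h'))
            · subst h; rw [hpc] at hc0; rw [← hc0] at hcc; simp at hcc
      · -- other char
        rename_i hne1 hne2
        refine ih (j + 1) st m (by omega) hdrop' ?_ ?_ ?_ hnd
        · intro t ht
          have h1 := hst t ht
          refine ⟨by omega, ?_⟩
          rw [h1.2, pvInner_step cs j (t + 1) hjn (by omega)]
          simp [hc0, hne1, hne2]
        · intro pq hpq
          have := hm pq hpq
          exact ⟨this.1, by omega, this.2.2⟩
        · intro p hpj hp hpc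
          rcases Nat.lt_succ_iff_lt_or_eq.1 hpj with h | h
          · exact hcomp p h hp hpc
          · subst h; rw [hpc] at hc0; exact absurd hc0.symm hne1

theorem pvBuild_inv0 (cs : List Char) :
    ((∀ t (ht : t < (pvBuild cs 0 [] PySem.Dict.empty).1.length),
        pvInner cs ((pvBuild cs 0 [] PySem.Dict.empty).1[t] + 1) 1 = pvInner cs cs.length (t + 1)) ∧
     (∀ pq ∈ (pvBuild cs 0 [] PySem.Dict.empty).2.items, pvInner cs (pq.1 + 1) 1 = (pq.2 + 1, 0)) ∧
     (∀ p, (hp : p < cs.length) → cs[p] = '(' →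
        p ∈ (pvBuild cs 0 [] PySem.Dict.empty).1 ∨ p ∈ (pvBuild cs 0 [] PySem.Dict.empty).2.keys) ∧
     (pvBuild cs 0 [] PySem.Dict.empty).2.keys.Nodup) := by
  refine pvBuild_inv cs cs 0 [] PySem.Dict.empty (by omega) (by simp) (by simp) ?_ (by omega) ?_
  · intro pq hpq; simp [PySem.Dict.empty] at hpq
  · exact PySem.Dict.nodup_keys_empty

theorem pvMatch_some (cs : List Char) (p q : Nat)
    (h : (pvBuild cs 0 [] PySem.Dict.empty).2.get? p = some q) :
    pvInner cs (p + 1) 1 = (q + 1, 0) :=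
  (pvBuild_inv0 cs).2.1 (p, q) (PySem.Dict.mem_items_of_get?_eq_some _ h)

theorem pvMatch_none (cs : List Char) (p : Nat) (hp : p < cs.length) (hc : cs[p] = '(')
    (h : (pvBuild cs 0 [] PySem.Dict.empty).2.get? p = none) :
    (pvInner cs (p + 1) 1).2 ≠ 0 := by
  have hnk : p ∉ (pvBuild cs 0 [] PySem.Dict.empty).2.keys :=
    (PySem.Dict.get?_eq_none_iff_not_mem_keys _ _).1 h
  have hmem : p ∈ (pvBuild cs 0 [] PySem.Dict.empty).1 := by
    rcases (pvBuild_inv0 cs).2.2.1 p hp hc with h' | h'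
    · exact h'
    · exact absurd h' hnk
  obtain ⟨t, ht, hpt⟩ := List.mem_iff_getElem.1 hmem
  have := (pvBuild_inv0 cs).1 t ht
  rw [hpt] at this
  rw [this, pvInner_stop cs cs.length (t + 1) (by omega)]
  simp

-- needed by pvOuterA's termination

theorem pvScanB_stop (cs : List Char) (m hm) (i : Nat) (acc : List String)
    (h : ¬ i + 1 < cs.length) : pvScanB cs m hm i acc = acc := by
  rw [pvScanB]; simp [h]

theorem pvScanB_skip (cs : List Char) (m hm) (i : Nat) (acc : List String)
    (h : i + 1 < cs.length) (hcond : ¬(cs[i]'(by omega) = '$' ∧ cs[i + 1]'h = '(')) :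
    pvScanB cs m hm i acc = pvScanB cs m hm (i + 1) acc := by
  rw [pvScanB]; simp [h, hcond]

theorem pvScanB_none (cs : List Char) (m hm) (i : Nat) (acc : List String)
    (h : i + 1 < cs.length) (hcond : cs[i]'(by omega) = '$' ∧ cs[i + 1]'h = '(')
    (hget : m.get? (i + 1) = none) :
    pvScanB cs m hm i acc = pvScanB cs m hm (i + 1) acc := by
  rw [pvScanB]; simp only [dif_pos h, if_pos hcond]
  split <;> simp_all

theorem pvScanB_some (cs : List Char) (m hm) (i : Nat) (acc : List String) (j : Nat)
    (h : i + 1 < cs.length) (hcond : cs[i]'(by omega) = '$' ∧ cs[i + 1]'h = '(')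
    (hget : m.get? (i + 1) = some j) :
    pvScanB cs m hm i acc = pvScanB cs m hm (j + 1)
      (acc ++ [String.ofList (PySem.List.slice cs (some ((i : Int) + 2)) (some (j : Int)))]) := by
  rw [pvScanB]; simp only [dif_pos h, if_pos hcond]
  split <;> simp_all

theorem pvAB_eq (cs : List Char) (i : Nat) (acc : List String) :
    pvOuterA cs i acc =
      pvScanB cs (pvBuild cs 0 [] PySem.Dict.empty).2
        (pvBuild_lt cs 0 [] PySem.Dict.empty (fun _ h => nomatch h) (fun _ h => nomatch h)) i acc := by
  fun_induction pvOuterA cs i acc with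
  | case1 i acc h hcond hz ih =>
    -- matched: pvInner depth 0
    rcases hget : (pvBuild cs 0 [] PySem.Dict.empty).2.get? (i + 1) with _ | j
    · exact absurd ((pvMatch_none cs (i + 1) h hcond.2 hget)) (by simpa using hz)
    · have hsome := pvMatch_some cs (i + 1) j hget
      rw [pvScanB_some cs _ _ i acc j h hcond hget]
      have h1 : (pvInner cs (i + 2) 1).1 = j + 1 := by rw [hsome]
      have h2 : ((((pvInner cs (i + 2) 1).1 : Nat) : Int) - 1) = (j : Int) := by
        rw [h1]; push_cast; ring
      rw [h2] at ih ⊢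
      rw [h1] at ih ⊢
      exact ih
  | case2 i acc h hcond hz ih =>
    rcases hget : (pvBuild cs 0 [] PySem.Dict.empty).2.get? (i + 1) with _ | j
    · rw [pvScanB_none cs _ _ i acc h hcond hget]; exact ih
    · have hsome := pvMatch_some cs (i + 1) j hget
      rw [hsome] at hz; simp at hz
  | case3 i acc h hcond ih =>
    rw [pvScanB_skip cs _ _ i acc h hcond]; exact ih
  | case4 i acc h =>
    rw [pvScanB_stop cs _ _ i acc h]

-- ===== VERDICT (by name: the statement is the Claim_ definition above) =====
theorem extract_dollar_paren_bodies_py_spec : Claim_equal_extract_dollar_paren_bodies_py := by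
  intro text _
  unfold Spec_extract_dollar_paren_bodies_py extract_dollar_paren_bodies_py
    extract_dollar_paren_bodies_py_alt
  exact pvAB_eq text.toList 0 []
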